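-- pv_equiv track=rewrite | github.com/brkdnmz/inzvaland | Winter Camp 23/rumeysas-high-budget-feedback-form/funcs.py | solve
-- ===== SOURCE A (Python) =====
-- MOD = 10**9 + 7
--
-- def solve(a: int, b: int) -> int:
--     if a < b:
--         a, b = b, a
--     if not b:
--         return pow(2, max(0, a - 1), MOD)
--     dp = [[0] * (b + 1) for _ in range(a + 1)]
--     dp[0][0] = 1
--     for i in range(a + 1):
--         for j in range(b + 1):
--             if i:
--                 dp[i][j] = (1 + (i + j > 1)) * dp[i - 1][j]
--                 dp[i][j] %= MOD
--             if j:
--                 dp[i][j] += (1 + (i + j> 1)) * dp[i][j - 1]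
--                 dp[i][j] %= MOD
--             if i and j:
--                 dp[i][j] -= (1 + (i > 1 or j > 1)) * dp[i - 1][j - 1]
--                 dp[i][j] %= MOD
--     return dp[a][b]
-- ===== SOURCE B (Python) =====
-- MOD = 10**9 + 7
--
-- def solve(a: int, b: int) -> int:
--     # closed form: sum over k of C(min,k)*C(max,k)*2^(a+b-1-k)  (mod MOD)
--     if a > b:
--         a, b = b, a                 # a = min, b = max
--     if a == 0:
--         return pow(2, max(0, b - 1), MOD)
--     inv2 = (MOD + 1) // 2           # modular inverse of 2
--     s = 0
--     ca = 1                          # C(a, k), exact integer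
--     cb = 1                          # C(b, k), exact integer
--     pw = pow(2, a + b - 1, MOD)     # 2^(a+b-1-k) mod MOD
--     for k in range(a + 1):
--         s = (s + ca % MOD * (cb % MOD) % MOD * pw) % MOD
--         ca = ca * (a - k) // (k + 1)
--         cb = cb * (b - k) // (k + 1)
--         pw = pw * inv2 % MOD
--     return s
-- ===== Notes on version B (the rewrite author's own statement) =====
-- stated objective: faster
-- what changed: Replaces the O(a*b) two-dimensional DP table by the closed-form binomial sum sum_k C(min,k)*C(max,k)*2^(a+b-1-k) mod 1e9+7, computed in one O(min(a,b)) loop with incrementally updated exact binomials and a power of 2 maintained via the modular inverse of 2.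
import Mathlib
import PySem

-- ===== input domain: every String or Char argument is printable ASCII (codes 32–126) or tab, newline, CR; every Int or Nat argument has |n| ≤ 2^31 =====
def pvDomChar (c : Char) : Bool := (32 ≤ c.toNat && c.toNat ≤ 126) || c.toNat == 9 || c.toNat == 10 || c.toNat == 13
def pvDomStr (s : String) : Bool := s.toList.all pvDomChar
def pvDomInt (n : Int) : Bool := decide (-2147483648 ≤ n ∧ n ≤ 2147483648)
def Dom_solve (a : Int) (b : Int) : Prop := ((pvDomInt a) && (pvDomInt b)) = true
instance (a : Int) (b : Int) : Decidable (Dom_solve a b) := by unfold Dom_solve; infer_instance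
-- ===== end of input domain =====

-- B replaces A's O(a*b) DP table by the closed-form binomial sum
-- sum_k C(min,k)*C(max,k)*2^(a+b-1-k) mod 1e9+7, computed in one O(min(a,b)) loop.

-- ===== PORT A =====
def pvMOD : Int := 1000000007

-- Python's dp is a list of lists with O(1) indexed read/write; the natural Lean analogue is
-- Array (Array Int).  Every read/write A performs happens at a nonnegative in-range index,
-- so .toNat / getD / setIfInBounds are exact there (PySem has no array primitive; ported by hand).
def pvCell (dp : Array (Array Int)) (i j : Int) : Int :=
  (dp.getD i.toNat #[]).getD j.toNat 0

-- dp[i][j] = v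
def pvSetCell (dp : Array (Array Int)) (i j : Int) (v : Int) : Array (Array Int) :=
  dp.setIfInBounds i.toNat ((dp.getD i.toNat #[]).setIfInBounds j.toNat v)

-- body of A's inner loop: the three conditional updates of dp[i][j]
def pvStepA (dp : Array (Array Int)) (i j : Int) : Array (Array Int) :=
  let dp := if i ≠ 0 then
      pvSetCell dp i j (PySem.Int.mod ((1 + (if i + j > 1 then (1:Int) else 0)) * pvCell dp (i-1) j) pvMOD)
    else dp
  let dp := if j ≠ 0 then
      pvSetCell dp i j (PySem.Int.mod (pvCell dp i j + (1 + (if i + j > 1 then (1:Int) else 0)) * pvCell dp i (j-1)) pvMOD)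
    else dp
  if i ≠ 0 ∧ j ≠ 0 then
      pvSetCell dp i j (PySem.Int.mod (pvCell dp i j - (1 + (if i > 1 ∨ j > 1 then (1:Int) else 0)) * pvCell dp (i-1) (j-1)) pvMOD)
  else dp

def solve (a : Int) (b : Int) : Int :=
  let p := if a < b then (b, a) else (a, b)
  let a := p.1
  let b := p.2
  if b = 0 then
    -- pow(2, max(0, a - 1), MOD): the exponent is ≥ 0, so .toNat is exact
    PySem.Int.powMod 2 (max 0 (a - 1)).toNat pvMOD
  else
    let dp : Array (Array Int) := Array.replicate (a + 1).toNat (Array.replicate (b + 1).toNat 0)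
    let dp := pvSetCell dp 0 0 1
    let dp := (PySem.List.pyRange 0 (a + 1) 1).foldl
      (fun dp i => (PySem.List.pyRange 0 (b + 1) 1).foldl (fun dp j => pvStepA dp i j) dp) dp
    pvCell dp a b

-- ===== PORT B =====
def solve_alt (a : Int) (b : Int) : Int :=
  let p := if a > b then (b, a) else (a, b)
  let a := p.1
  let b := p.2
  if a = 0 then
    PySem.Int.powMod 2 (max 0 (b - 1)).toNat pvMOD
  else
    let inv2 := PySem.Int.floordiv (pvMOD + 1) 2
    -- pow(2, a + b - 1, MOD): inside Pre_solve the exponent is ≥ 1 here, so .toNat is exact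
    let st := (PySem.List.pyRange 0 (a + 1) 1).foldl
      (fun st k =>
        let s := PySem.Int.mod (st.1 + PySem.Int.mod (PySem.Int.mod st.2.1 pvMOD * PySem.Int.mod st.2.2.1 pvMOD) pvMOD * st.2.2.2) pvMOD
        let ca := PySem.Int.floordiv (st.2.1 * (a - k)) (k + 1)
        let cb := PySem.Int.floordiv (st.2.2.1 * (b - k)) (k + 1)
        let pw := PySem.Int.mod (st.2.2.2 * inv2) pvMOD
        (s, ca, cb, pw))
      ((0 : Int), (1 : Int), (1 : Int), PySem.Int.powMod 2 (a + b - 1).toNat pvMOD)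
    st.1

-- ===== PRECONDITION & SPEC =====
-- A raises IndexError (dp[0][0] on an empty row/table) whenever a or b is negative; Pre_ excludes exactly those.
def Pre_solve (a : Int) (b : Int) : Prop := 0 ≤ a ∧ 0 ≤ b
instance (a : Int) (b : Int) : Decidable (Pre_solve a b) := by unfold Pre_solve; infer_instance
def pvWitness_solve : Int × Int := (3, 2)

def Spec_solve (a : Int) (b : Int) (out : Int) : Prop := out = solve_alt a b
instance (a : Int) (b : Int) (out : Int) : Decidable (Spec_solve a b out) := by unfold Spec_solve; infer_instance

-- ===== CLAIM (what is proved, stated in full; the proofs are below) =====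
def Claim_equal_solve : Prop := ∀ (a : Int) (b : Int), Dom_solve a b → Pre_solve a b → Spec_solve a b (solve a b)

-- ===== LEMMAS AND PROOFS =====

-- ---- basic modular facts ----
lemma pvM_pos : (0:ℤ) < pvMOD := by norm_num [pvMOD]

lemma pv_mod_eq (x : ℤ) : PySem.Int.mod x pvMOD = x % pvMOD :=
  PySem.Int.mod_eq_emod_of_pos pvM_pos

lemma pv_hm (x : ℤ) : x % pvMOD ≡ x [ZMOD pvMOD] := Int.emod_emod_of_dvd x dvd_rfl

lemma pv_inv2 : PySem.Int.floordiv (pvMOD + 1) 2 = 500000004 := by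
  rw [PySem.Int.floordiv_eq_ediv_of_pos (by norm_num)]; norm_num [pvMOD]

-- ---- the exact (un-modded) value of A's DP cell (i, j) ----
def pvG : ℕ → ℕ → ℤ
  | 0, 0 => 1
  | i+1, 0 => (if i = 0 then 1 else 2) * pvG i 0
  | 0, j+1 => (if j = 0 then 1 else 2) * pvG 0 j
  | i+1, j+1 =>
      2 * (pvG i (j+1) + pvG (i+1) j) - (if i = 0 ∧ j = 0 then 1 else 2) * pvG i j
  termination_by i j => i + j

-- ---- closed-form sums ----
def pvT (m n k : ℕ) : ℤ := (m.choose k : ℤ) * (n.choose k) * 2 ^ (m + n - k)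

def pvH (i j : ℕ) : ℤ := ∑ k ∈ Finset.range (i + j + 1), pvT i j k

def pvU (m n : ℕ) : ℕ → ℤ
  | 0 => 0
  | k+1 => -2 * pvT m n k

def pvSpart (A B n : ℕ) : ℤ :=
  ∑ k ∈ Finset.range n, (A.choose k : ℤ) * (B.choose k) * 2 ^ (A + B - 1 - k)

def pvS (A B : ℕ) : ℤ := pvSpart A B (A + 1)

-- ---- table model ----
def pvInit (r c : ℕ) : ℤ := if r = 0 ∧ c = 0 then 1 else 0
def pvVal (r c : ℕ) : ℤ := pvG r c % pvMOD

def pvInv (P Q : ℕ) (dp : Array (Array Int)) (i j : ℕ) : Prop :=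
  dp.size = P + 1 ∧ (∀ r : ℕ, (dp.getD r #[]).size = if r < P + 1 then Q + 1 else 0) ∧
  ∀ r c : ℕ, r ≤ P → c ≤ Q →
    pvCell dp ↑r ↑c = if r < i ∨ (r = i ∧ c < j) then pvVal r c else pvInit r c

-- ---- array helpers ----
lemma pv_getD_set_self {α : Type} (xs : Array α) (n : ℕ) (v : α) (d : α) (h : n < xs.size) :
    (xs.setIfInBounds n v).getD n d = v := by
  simp [Array.getD_eq_getD_getElem?, h]

lemma pv_getD_set_ne {α : Type} (xs : Array α) (m n : ℕ) (v : α) (d : α) (h : m ≠ n) :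
    (xs.setIfInBounds m v).getD n d = xs.getD n d := by
  simp [Array.getD_eq_getD_getElem?, h]

lemma pvCell_cast (dp : Array (Array Int)) (r c : ℕ) :
    pvCell dp ↑r ↑c = (dp.getD r #[]).getD c 0 := by
  simp [pvCell]

lemma pvSetCell_cast (dp : Array (Array Int)) (r c : ℕ) (v : Int) :
    pvSetCell dp ↑r ↑c v = dp.setIfInBounds r ((dp.getD r #[]).setIfInBounds c v) := by
  simp [pvSetCell]

lemma pvSetCell_length (dp : Array (Array Int)) (i j : Int) (v : Int) :
    (pvSetCell dp i j v).size = dp.size := by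
  simp [pvSetCell, Array.size_setIfInBounds]

lemma pvCell_setCell_self (dp : Array (Array Int)) (r c : ℕ) (v : Int)
    (hr : r < dp.size) (hc : c < (dp.getD r #[]).size) :
    pvCell (pvSetCell dp ↑r ↑c v) ↑r ↑c = v := by
  rw [pvSetCell_cast, pvCell_cast, pv_getD_set_self _ _ _ _ hr,
      pv_getD_set_self _ _ _ _ hc]

lemma pvCell_setCell_ne (dp : Array (Array Int)) (r c r' c' : ℕ) (v : Int)
    (hr : r < dp.size) (h : ¬(r = r' ∧ c = c')) :
    pvCell (pvSetCell dp ↑r ↑c v) ↑r' ↑c' = pvCell dp ↑r' ↑c' := by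
  rw [pvSetCell_cast, pvCell_cast, pvCell_cast]
  by_cases hrr : r = r'
  · subst hrr
    have hcc : c ≠ c' := by tauto
    rw [pv_getD_set_self _ _ _ _ hr, pv_getD_set_ne _ _ _ _ _ hcc]
  · rw [pv_getD_set_ne _ _ _ _ _ hrr]

lemma pvSetCell_rowlen (dp : Array (Array Int)) (r c : ℕ) (v : Int) (hr : r < dp.size) (r' : ℕ) :
    ((pvSetCell dp ↑r ↑c v).getD r' #[]).size = (dp.getD r' #[]).size := by
  rw [pvSetCell_cast]
  by_cases hrr : r = r'
  · subst hrr
    rw [pv_getD_set_self _ _ _ _ hr, Array.size_setIfInBounds]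
  · rw [pv_getD_set_ne _ _ _ _ _ hrr]

lemma pvSetCell_setCell (dp : Array (Array Int)) (r c : ℕ) (v w : Int) (hr : r < dp.size) :
    pvSetCell (pvSetCell dp ↑r ↑c v) ↑r ↑c w = pvSetCell dp ↑r ↑c w := by
  rw [pvSetCell_cast, pvSetCell_cast, pvSetCell_cast]
  rw [pv_getD_set_self _ _ _ _ hr, Array.setIfInBounds_setIfInBounds,
      Array.setIfInBounds_setIfInBounds]

lemma pv_getD_replicate {α : Type} (n m : ℕ) (a d : α) :
    (Array.replicate n a).getD m d = if m < n then a else d := by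
  by_cases h : m < n
  · rw [if_pos h]
    simp [Array.getD_eq_getD_getElem?, h]
  · rw [if_neg h]
    simp [Array.getD_eq_getD_getElem?, h]

-- ---- the value A's step writes into cell (i, j) ----
set_option maxHeartbeats 1000000 in
lemma pv_step_eval (P Q i j : ℕ) (dp : Array (Array Int)) (hi : i ≤ P) (hj : j ≤ Q)
    (h : pvInv P Q dp i j) :
    pvStepA dp ↑i ↑j = if i = 0 ∧ j = 0 then dp else pvSetCell dp ↑i ↑j (pvVal i j) := by
  obtain ⟨hlen, hrow, hcell⟩ := h
  have hdlen : i < dp.size := by omega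
  have hrlen : (dp.getD i #[]).size = Q + 1 := by rw [hrow i, if_pos (by omega)]
  match i, j with
  | 0, 0 =>
    simp [pvStepA]
  | 0, c+1 =>
    rw [if_neg (by omega)]
    have h0 : ¬((0:ℕ):ℤ) ≠ 0 := by simp
    have hjc : ((c+1:ℕ):ℤ) ≠ 0 := by
      have : (0:ℤ) < ((c+1:ℕ):ℤ) := by exact_mod_cast Nat.succ_pos c
      omega
    have h1 : pvCell dp ((0:ℕ):ℤ) ((c+1 : ℕ):ℤ) = pvInit 0 (c+1) := by
      rw [hcell 0 (c+1) (by omega) hj, if_neg (by omega)]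
    have h2 : pvCell dp ((0:ℕ):ℤ) ((c : ℕ):ℤ) = pvVal 0 c := by
      rw [hcell 0 c (by omega) (by omega), if_pos (by omega)]
    have hco : (1 + (if ((0:ℕ):ℤ) + ((c+1 : ℕ):ℤ) > 1 then (1:ℤ) else 0)) = (if c = 0 then (1:ℤ) else 2) := by
      push_cast; split_ifs <;> omega
    have hj1 : (((c+1 : ℕ):ℤ)) - 1 = ((c : ℕ):ℤ) := by push_cast; ring
    simp only [pvStepA, if_neg h0, if_pos hjc, if_neg (show ¬(((0:ℕ):ℤ) ≠ 0 ∧ ((c+1 : ℕ):ℤ) ≠ 0) from fun hh => h0 hh.1)]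
    rw [hj1, h1, h2, hco]
    congr 1
    rw [pv_mod_eq]
    have hginit : pvInit 0 (c+1) = 0 := by simp [pvInit]
    rw [hginit, zero_add]
    show ((if c = 0 then (1:ℤ) else 2) * pvVal 0 c) % pvMOD = pvVal 0 (c+1)
    simp only [pvVal]
    have hgeq : pvG 0 (c+1) = (if c = 0 then (1:ℤ) else 2) * pvG 0 c := by rw [pvG]
    rw [hgeq]
    exact ((pv_hm (pvG 0 c)).mul_left _)
  | r+1, 0 =>
    rw [if_neg (by omega)]
    have h0 : ¬((0:ℕ):ℤ) ≠ 0 := by simp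
    have hir : ((r+1:ℕ):ℤ) ≠ 0 := by
      have : (0:ℤ) < ((r+1:ℕ):ℤ) := by exact_mod_cast Nat.succ_pos r
      omega
    have h2 : pvCell dp ((r : ℕ):ℤ) ((0:ℕ):ℤ) = pvVal r 0 := by
      rw [hcell r 0 (by omega) (by omega), if_pos (by omega)]
    have hco : (1 + (if ((r+1 : ℕ):ℤ) + ((0:ℕ):ℤ) > 1 then (1:ℤ) else 0)) = (if r = 0 then (1:ℤ) else 2) := by
      push_cast; split_ifs <;> omega
    have hi1 : (((r+1 : ℕ):ℤ)) - 1 = ((r : ℕ):ℤ) := by push_cast; ring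
    simp only [pvStepA, if_pos hir, if_neg h0, if_neg (show ¬(((r+1 : ℕ):ℤ) ≠ 0 ∧ ((0:ℕ):ℤ) ≠ 0) from fun hh => h0 hh.2)]
    rw [hi1, h2, hco]
    congr 1
    rw [pv_mod_eq]
    show ((if r = 0 then (1:ℤ) else 2) * pvVal r 0) % pvMOD = pvVal (r+1) 0
    simp only [pvVal]
    have hgeq : pvG (r+1) 0 = (if r = 0 then (1:ℤ) else 2) * pvG r 0 := by rw [pvG]
    rw [hgeq]
    exact ((pv_hm (pvG r 0)).mul_left _)
  | r+1, c+1 =>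
    rw [if_neg (by omega)]
    have hir : ((r+1:ℕ):ℤ) ≠ 0 := by
      have : (0:ℤ) < ((r+1:ℕ):ℤ) := by exact_mod_cast Nat.succ_pos r
      omega
    have hjc : ((c+1:ℕ):ℤ) ≠ 0 := by
      have : (0:ℤ) < ((c+1:ℕ):ℤ) := by exact_mod_cast Nat.succ_pos c
      omega
    have hi1 : (((r+1 : ℕ):ℤ)) - 1 = ((r : ℕ):ℤ) := by push_cast; ring
    have hj1 : (((c+1 : ℕ):ℤ)) - 1 = ((c : ℕ):ℤ) := by push_cast; ring
    have hc1 : (1 + (if ((r+1 : ℕ):ℤ) + ((c+1 : ℕ):ℤ) > 1 then (1:ℤ) else 0)) = 2 := by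
      push_cast; rw [if_pos (by omega)]; norm_num
    have hc3 : (1 + (if ((r+1 : ℕ):ℤ) > 1 ∨ ((c+1 : ℕ):ℤ) > 1 then (1:ℤ) else 0))
        = (if r = 0 ∧ c = 0 then (1:ℤ) else 2) := by
      push_cast
      by_cases h : (r:ℤ) + 1 > 1 ∨ (c:ℤ) + 1 > 1
      · rw [if_pos h, if_neg (by omega)]; norm_num
      · rw [if_neg h, if_pos (by omega)]; norm_num
    have hg1 : pvCell dp ((r : ℕ):ℤ) ((c+1 : ℕ):ℤ) = pvVal r (c+1) := by
      rw [hcell r (c+1) (by omega) hj, if_pos (by omega)]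
    have hg2 : pvCell dp ((r+1 : ℕ):ℤ) ((c : ℕ):ℤ) = pvVal (r+1) c := by
      rw [hcell (r+1) c hi (by omega), if_pos (by omega)]
    have hg3 : pvCell dp ((r : ℕ):ℤ) ((c : ℕ):ℤ) = pvVal r c := by
      rw [hcell r c (by omega) (by omega), if_pos (by omega)]
    simp only [pvStepA, if_pos hir, if_pos hjc, if_pos (And.intro hir hjc), hi1, hj1, hc1, hc3]
    rw [hg1]
    set v1 := PySem.Int.mod (2 * pvVal r (c+1)) pvMOD with hv1
    have hcell1self : pvCell (pvSetCell dp ((r+1:ℕ):ℤ) ((c+1:ℕ):ℤ) v1) ((r+1:ℕ):ℤ) ((c+1:ℕ):ℤ) = v1 :=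
      pvCell_setCell_self dp (r+1) (c+1) v1 hdlen (by omega)
    have hcell1g2 : pvCell (pvSetCell dp ((r+1:ℕ):ℤ) ((c+1:ℕ):ℤ) v1) ((r+1:ℕ):ℤ) ((c:ℕ):ℤ) = pvVal (r+1) c := by
      rw [pvCell_setCell_ne dp (r+1) (c+1) (r+1) c v1 hdlen (by omega), hg2]
    rw [hcell1self, hcell1g2]
    set v2 := PySem.Int.mod (v1 + 2 * pvVal (r+1) c) pvMOD with hv2
    have hd1len : (pvSetCell dp ((r+1:ℕ):ℤ) ((c+1:ℕ):ℤ) v1).size = dp.size := pvSetCell_length _ _ _ _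
    have hrlen1 : ((pvSetCell dp ((r+1:ℕ):ℤ) ((c+1:ℕ):ℤ) v1).getD (r+1) #[]).size = Q + 1 := by
      rw [pvSetCell_rowlen dp (r+1) (c+1) v1 hdlen (r+1), hrow, if_pos (by omega)]
    have hcell2self : pvCell (pvSetCell (pvSetCell dp ((r+1:ℕ):ℤ) ((c+1:ℕ):ℤ) v1) ((r+1:ℕ):ℤ) ((c+1:ℕ):ℤ) v2) ((r+1:ℕ):ℤ) ((c+1:ℕ):ℤ) = v2 :=
      pvCell_setCell_self _ (r+1) (c+1) v2 (by omega) (by omega)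
    have hcell2g3 : pvCell (pvSetCell (pvSetCell dp ((r+1:ℕ):ℤ) ((c+1:ℕ):ℤ) v1) ((r+1:ℕ):ℤ) ((c+1:ℕ):ℤ) v2) ((r:ℕ):ℤ) ((c:ℕ):ℤ) = pvVal r c := by
      rw [pvCell_setCell_ne _ (r+1) (c+1) r c v2 (by omega) (by omega),
          pvCell_setCell_ne dp (r+1) (c+1) r c v1 hdlen (by omega), hg3]
    rw [hcell2self, hcell2g3]
    set v3 := PySem.Int.mod (v2 - (if r = 0 ∧ c = 0 then (1:ℤ) else 2) * pvVal r c) pvMOD with hv3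
    have hcollapse : pvSetCell (pvSetCell (pvSetCell dp ((r+1:ℕ):ℤ) ((c+1:ℕ):ℤ) v1) ((r+1:ℕ):ℤ) ((c+1:ℕ):ℤ) v2) ((r+1:ℕ):ℤ) ((c+1:ℕ):ℤ) v3
        = pvSetCell dp ((r+1:ℕ):ℤ) ((c+1:ℕ):ℤ) v3 := by
      rw [pvSetCell_setCell _ (r+1) (c+1) v2 v3 (by omega),
          pvSetCell_setCell dp (r+1) (c+1) v1 v3 hdlen]
    rw [hcollapse]
    congr 1
    rw [hv3, hv2, hv1]
    rw [pv_mod_eq, pv_mod_eq, pv_mod_eq]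
    simp only [pvVal]
    have hgeq : pvG (r+1) (c+1) = 2 * (pvG r (c+1) + pvG (r+1) c) - (if r = 0 ∧ c = 0 then (1:ℤ) else 2) * pvG r c := by
      rw [pvG]
    rw [hgeq]
    have e1 : (2 * (pvG r (c+1) % pvMOD)) % pvMOD ≡ 2 * pvG r (c+1) [ZMOD pvMOD] :=
      (pv_hm _).trans ((pv_hm (pvG r (c+1))).mul_left 2)
    have e2 : (2 * (pvG r (c+1) % pvMOD)) % pvMOD + 2 * (pvG (r+1) c % pvMOD)
        ≡ 2 * pvG r (c+1) + 2 * pvG (r+1) c [ZMOD pvMOD] :=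
      e1.add ((pv_hm (pvG (r+1) c)).mul_left 2)
    have e3 := ((pv_hm _).trans e2).sub ((pv_hm (pvG r c)).mul_left (if r = 0 ∧ c = 0 then (1:ℤ) else 2))
    have e4 : 2 * pvG r (c+1) + 2 * pvG (r+1) c = 2 * (pvG r (c+1) + pvG (r+1) c) := by ring
    rw [e4] at e3
    exact e3

-- step preserves the invariant
lemma pv_stepInv (P Q i j : ℕ) (dp : Array (Array Int)) (hi : i ≤ P) (hj : j ≤ Q)
    (h : pvInv P Q dp i j) :
    pvInv P Q (pvStepA dp ↑i ↑j) i (j+1) := by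
  rw [pv_step_eval P Q i j dp hi hj h]
  obtain ⟨hlen, hrow, hcell⟩ := h
  by_cases h00 : i = 0 ∧ j = 0
  · rw [if_pos h00]
    obtain ⟨rfl, rfl⟩ := h00
    refine ⟨hlen, hrow, ?_⟩
    intro r c hr hc
    rw [hcell r c hr hc]
    by_cases hd : r = 0 ∧ c = 0
    · obtain ⟨rfl, rfl⟩ := hd
      rw [if_neg (by omega), if_pos (by omega)]
      unfold pvVal pvInit
      rw [if_pos ⟨rfl, rfl⟩]
      have hg : pvG 0 0 = 1 := by rw [pvG]
      rw [hg]
      norm_num [pvMOD]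
    · rw [if_neg (by omega), if_neg (by omega)]
  · rw [if_neg h00]
    have hdlen : i < dp.size := by omega
    refine ⟨by rw [pvSetCell_length]; exact hlen, ?_, ?_⟩
    · intro r
      rw [pvSetCell_rowlen dp i j _ hdlen r]; exact hrow r
    · intro r c hr hc
      by_cases hd : r = i ∧ c = j
      · obtain ⟨rfl, rfl⟩ := hd
        rw [pvCell_setCell_self dp r c _ hdlen (by rw [hrow r, if_pos (by omega)]; omega)]
        rw [if_pos (by omega)]
      · rw [pvCell_setCell_ne dp i j r c _ hdlen (by tauto), hcell r c hr hc]
        by_cases hdone : r < i ∨ (r = i ∧ c < j)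
        · rw [if_pos hdone, if_pos (by omega)]
        · rw [if_neg hdone, if_neg (by omega)]

lemma pv_innerInv (P Q i : ℕ) (hi : i ≤ P) :
    ∀ n, n ≤ Q + 1 → ∀ dp, pvInv P Q dp i 0 →
      pvInv P Q ((List.range n).foldl (fun dp (j : ℕ) => pvStepA dp ↑i ↑j) dp) i n := by
  intro n
  induction n with
  | zero => intro _ dp h; simpa using h
  | succ n ih =>
    intro hn dp h
    rw [show List.range (n+1) = List.range n ++ [n] from List.range_succ,
        List.foldl_append, List.foldl_cons, List.foldl_nil]
    exact pv_stepInv P Q i n _ hi (by omega) (ih (by omega) dp h)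

lemma pv_shift (P Q : ℕ) (dp : Array (Array Int)) (i : ℕ) (h : pvInv P Q dp i (Q+1)) :
    pvInv P Q dp (i+1) 0 := by
  obtain ⟨h1, h2, h3⟩ := h
  refine ⟨h1, h2, ?_⟩
  intro r c hr hc
  rw [h3 r c hr hc]
  by_cases hd : r < i ∨ (r = i ∧ c < Q + 1)
  · rw [if_pos hd, if_pos (by omega)]
  · rw [if_neg hd, if_neg (by omega)]

lemma pv_outerInv (P Q : ℕ) :
    ∀ n, n ≤ P + 1 → ∀ dp, pvInv P Q dp 0 0 →
      pvInv P Q ((List.range n).foldl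
        (fun dp (i : ℕ) => (List.range (Q+1)).foldl (fun dp (j : ℕ) => pvStepA dp ↑i ↑j) dp) dp) n 0 := by
  intro n
  induction n with
  | zero => intro _ dp h; simpa using h
  | succ n ih =>
    intro hn dp h
    rw [show List.range (n+1) = List.range n ++ [n] from List.range_succ,
        List.foldl_append, List.foldl_cons, List.foldl_nil]
    exact pv_shift P Q _ n (pv_innerInv P Q n (by omega) (Q+1) le_rfl _ (ih (by omega) dp h))

lemma pv_initInv (P Q : ℕ) :
    pvInv P Q (pvSetCell (Array.replicate (P+1) (Array.replicate (Q+1) (0:ℤ))) 0 0 1) 0 0 := by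
  have h00 : pvSetCell (Array.replicate (P+1) (Array.replicate (Q+1) (0:ℤ))) 0 0 1
      = pvSetCell (Array.replicate (P+1) (Array.replicate (Q+1) (0:ℤ))) ((0:ℕ):ℤ) ((0:ℕ):ℤ) 1 := by
    norm_num
  rw [h00, pvSetCell_cast]
  have hget : ∀ r : ℕ, ((Array.replicate (P+1) (Array.replicate (Q+1) (0:ℤ))).getD r #[])
      = if r < P + 1 then Array.replicate (Q+1) (0:ℤ) else #[] := by
    intro r
    rw [pv_getD_replicate]
  refine ⟨by simp, ?_, ?_⟩
  · intro r
    by_cases hr : r = 0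
    · subst hr
      rw [pv_getD_set_self _ _ _ _ (by simp), hget 0, if_pos (by omega), if_pos (by omega)]
      simp
    · rw [pv_getD_set_ne _ _ _ _ _ (fun h => hr h.symm), hget r]
      by_cases h : r < P + 1 <;> simp [h]
  · intro r c hr hc
    rw [if_neg (by omega)]
    rw [pvCell_cast]
    unfold pvInit
    by_cases hr0 : r = 0
    · subst hr0
      rw [pv_getD_set_self _ _ _ _ (by simp)]
      by_cases hc0 : c = 0
      · subst hc0
        rw [if_pos ⟨rfl, rfl⟩,
            pv_getD_set_self _ _ _ _ (by rw [hget 0, if_pos (by omega)]; simp)]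
      · rw [if_neg (by tauto), pv_getD_set_ne _ _ _ _ _ (fun h => hc0 h.symm), hget 0, if_pos (by omega),
            pv_getD_replicate, if_pos (by omega)]
    · rw [if_neg (by tauto), pv_getD_set_ne _ _ _ _ _ (fun h => hr0 h.symm), hget r, if_pos (by omega),
          pv_getD_replicate, if_pos (by omega)]

lemma pv_range_cast (n : ℕ) :
    PySem.List.pyRange 0 ((n:ℤ) + 1) 1 = List.map (fun k : ℕ => (k:ℤ)) (List.range (n+1)) := by
  have h : ((n:ℤ) + 1) = ((n+1 : ℕ) : ℤ) := by push_cast; ring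
  rw [h, PySem.List.pyRange_zero_natCast]

theorem pv_tableEval (P Q : ℕ) :
    pvCell ((PySem.List.pyRange 0 ((P:ℤ) + 1) 1).foldl
      (fun dp i => (PySem.List.pyRange 0 ((Q:ℤ) + 1) 1).foldl (fun dp j => pvStepA dp i j) dp)
      (pvSetCell (Array.replicate (P + 1) (Array.replicate (Q + 1) 0)) 0 0 1)) ↑P ↑Q
    = pvG P Q % pvMOD := by
  rw [pv_range_cast P, pv_range_cast Q, List.foldl_map]
  have hfe : ((List.range (P+1)).foldl
        (fun dp (i : ℕ) => (List.map (fun k : ℕ => (k:ℤ)) (List.range (Q+1))).foldl (fun dp j => pvStepA dp ↑i j) dp)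
        (pvSetCell (Array.replicate (P+1) (Array.replicate (Q+1) (0:ℤ))) 0 0 1))
      = ((List.range (P+1)).foldl
        (fun dp (i : ℕ) => (List.range (Q+1)).foldl (fun dp (j : ℕ) => pvStepA dp ↑i ↑j) dp)
        (pvSetCell (Array.replicate (P+1) (Array.replicate (Q+1) (0:ℤ))) 0 0 1)) := by
    congr 1
    funext dp i
    rw [List.foldl_map]
  rw [hfe]
  obtain ⟨h1, h2, h3⟩ := pv_outerInv P Q (P+1) le_rfl _ (pv_initInv P Q)
  rw [h3 P Q le_rfl le_rfl, if_pos (by omega)]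
  rfl

-- ---- binomial-sum identity ----
lemma pvH_ext (i j MM : ℕ) (h : i + j + 1 ≤ MM) :
    pvH i j = ∑ k ∈ Finset.range MM, pvT i j k := by
  unfold pvH
  refine Finset.sum_subset ?_ ?_
  · intro x hx
    simp only [Finset.mem_range] at *
    omega
  · intro x _ hx
    simp only [Finset.mem_range, not_lt] at hx
    unfold pvT
    rw [Nat.choose_eq_zero_of_lt (by omega)]
    simp

lemma pv_point (m n : ℕ) (hmn : 1 ≤ m + n) (k : ℕ) :
    pvT (m+1) (n+1) k
      - (2 * pvT m (n+1) k + 2 * pvT (m+1) n k - 2 * pvT m n k)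
      = pvU m n (k+1) - pvU m n k := by
  cases k with
  | zero =>
    show pvT (m+1) (n+1) 0 - (2 * pvT m (n+1) 0 + 2 * pvT (m+1) n 0 - 2 * pvT m n 0)
      = pvU m n 1 - pvU m n 0
    simp only [pvT, pvU, Nat.choose_zero_right, Nat.cast_one, one_mul, Nat.sub_zero]
    have e1 : m + 1 + (n + 1) = (m + n) + 2 := by omega
    have e2 : m + (n + 1) = (m + n) + 1 := by omega
    have e3 : m + 1 + n = (m + n) + 1 := by omega
    rw [e1, e2, e3, pow_add, pow_add]
    ring
  | succ k' =>
    by_cases hk : k' + 1 ≤ m + n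
    · have e1 : m + 1 + (n + 1) - (k'+1) = (m + n - (k'+1)) + 2 := by omega
      have e2 : m + (n + 1) - (k'+1) = (m + n - (k'+1)) + 1 := by omega
      have e3 : m + 1 + n - (k'+1) = (m + n - (k'+1)) + 1 := by omega
      have e4 : m + n - k' = (m + n - (k'+1)) + 1 := by omega
      show pvT (m+1) (n+1) (k'+1)
          - (2 * pvT m (n+1) (k'+1) + 2 * pvT (m+1) n (k'+1) - 2 * pvT m n (k'+1))
          = -2 * pvT m n (k'+1) - -2 * pvT m n k'
      simp only [pvT]
      rw [e1, e2, e3, e4, Nat.choose_succ_succ m k', Nat.choose_succ_succ n k']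
      push_cast
      rw [pow_add, pow_add]
      simp only [Nat.succ_eq_add_one]
      ring
    · have h1 : m.choose (k'+1) = 0 := Nat.choose_eq_zero_of_lt (by omega)
      have h2 : n.choose (k'+1) = 0 := Nat.choose_eq_zero_of_lt (by omega)
      have h3 : ((m+1).choose (k'+1) : ℤ) * ((n+1).choose (k'+1)) = 0 := by
        rcases Nat.lt_or_ge (m+1) (k'+1) with h | h
        · rw [Nat.choose_eq_zero_of_lt h]; simp
        · have hn0 : n = 0 := by omega
          have hk'm : k' = m := by omega
          subst hn0
          rw [hk'm, Nat.choose_eq_zero_of_lt (show 1 < m + 1 by omega)]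
          simp
      have h4 : pvT m n k' = 0 := by
        simp only [pvT]
        rcases Nat.lt_or_ge m k' with h | h
        · rw [Nat.choose_eq_zero_of_lt h]; simp
        · have hn0 : n = 0 := by omega
          have hkm : k' = m := by omega
          subst hn0
          rw [hkm, Nat.choose_eq_zero_of_lt (show 0 < m by omega)]
          simp
      show pvT (m+1) (n+1) (k'+1)
          - (2 * pvT m (n+1) (k'+1) + 2 * pvT (m+1) n (k'+1) - 2 * pvT m n (k'+1))
          = -2 * pvT m n (k'+1) - -2 * pvT m n k'
      have h5 : pvT (m+1) (n+1) (k'+1) = 0 := by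
        simp only [pvT]
        rw [h3, zero_mul]
      have h6 : pvT m (n+1) (k'+1) = 0 := by
        simp only [pvT, h1]
        simp
      have h7 : pvT (m+1) n (k'+1) = 0 := by
        simp only [pvT, h2]
        simp
      have h8 : pvT m n (k'+1) = 0 := by
        simp only [pvT, h1]
        simp
      rw [h4, h5, h6, h7, h8]
      ring

theorem pvH_rec (m n : ℕ) (h : 1 ≤ m + n) :
    pvH (m+1) (n+1) = 2 * pvH m (n+1) + 2 * pvH (m+1) n - 2 * pvH m n := by
  have H1 : pvH (m+1) (n+1) = ∑ k ∈ Finset.range (m+n+3), pvT (m+1) (n+1) k :=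
    pvH_ext _ _ _ (by omega)
  have H2 : pvH m (n+1) = ∑ k ∈ Finset.range (m+n+3), pvT m (n+1) k :=
    pvH_ext _ _ _ (by omega)
  have H3 : pvH (m+1) n = ∑ k ∈ Finset.range (m+n+3), pvT (m+1) n k :=
    pvH_ext _ _ _ (by omega)
  have H4 : pvH m n = ∑ k ∈ Finset.range (m+n+3), pvT m n k :=
    pvH_ext _ _ _ (by omega)
  have hsum : ∑ k ∈ Finset.range (m+n+3),
      (pvT (m+1) (n+1) k - (2 * pvT m (n+1) k + 2 * pvT (m+1) n k - 2 * pvT m n k))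
      = pvU m n (m+n+3) - pvU m n 0 := by
    rw [← Finset.sum_range_sub (pvU m n) (m+n+3)]
    exact Finset.sum_congr rfl (fun k _ => pv_point m n h k)
  have hU : pvU m n (m+n+3) = 0 := by
    show -2 * pvT m n (m+n+2) = 0
    simp only [pvT]
    rw [Nat.choose_eq_zero_of_lt (show m < m+n+2 by omega)]
    simp
  have hU0 : pvU m n 0 = 0 := rfl
  rw [hU, hU0, sub_zero] at hsum
  rw [Finset.sum_sub_distrib, Finset.sum_sub_distrib, Finset.sum_add_distrib,
      ← Finset.mul_sum, ← Finset.mul_sum, ← Finset.mul_sum] at hsum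
  rw [H1, H2, H3, H4]
  linarith

lemma pvG_edge : ∀ i : ℕ, pvG (i+1) 0 = 2 ^ i := by
  intro i
  induction i with
  | zero =>
    have hg : pvG 0 0 = 1 := by rw [pvG]
    rw [pvG, hg]
    norm_num
  | succ i ih =>
    rw [pvG, if_neg (Nat.succ_ne_zero i), ih, pow_succ]
    ring

lemma pvG_zero_succ : ∀ j : ℕ, pvG 0 (j+1) = 2 ^ j := by
  intro j
  induction j with
  | zero =>
    have hg : pvG 0 0 = 1 := by rw [pvG]
    rw [pvG, hg]
    norm_num
  | succ j ih =>
    rw [pvG, if_neg (Nat.succ_ne_zero j), ih, pow_succ]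
    ring

lemma pvH_i0 (i : ℕ) (h : 1 ≤ i) : pvH i 0 = 2 ^ i := by
  unfold pvH
  rw [Finset.sum_eq_single_of_mem 0 (Finset.mem_range.2 (by omega))]
  · simp [pvT]
  · intro b _ hb
    simp only [pvT]
    rw [Nat.choose_eq_zero_of_lt (show 0 < b from Nat.pos_of_ne_zero hb)]
    simp

lemma pvH_0j (j : ℕ) (h : 1 ≤ j) : pvH 0 j = 2 ^ j := by
  unfold pvH
  rw [Finset.sum_eq_single_of_mem 0 (Finset.mem_range.2 (by omega))]
  · simp [pvT]
  · intro b _ hb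
    simp only [pvT]
    rw [Nat.choose_eq_zero_of_lt (show 0 < b from Nat.pos_of_ne_zero hb)]
    simp

theorem pvG_eq_H : ∀ (N i j : ℕ), i + j = N → ¬(i = 0 ∧ j = 0) → 2 * pvG i j = pvH i j := by
  intro N
  induction N using Nat.strong_induction_on with
  | _ N ih =>
    intro i j hij hne
    cases i with
    | zero =>
      cases j with
      | zero => exact absurd ⟨rfl, rfl⟩ hne
      | succ j => rw [pvG_zero_succ j, pvH_0j (j+1) (by omega), pow_succ]; ring
    | succ i =>
      cases j with
      | zero => rw [pvG_edge i, pvH_i0 (i+1) (by omega), pow_succ]; ring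
      | succ j =>
        by_cases h00 : i = 0 ∧ j = 0
        · obtain ⟨rfl, rfl⟩ := h00
          have g00 : pvG 0 0 = 1 := by rw [pvG]
          have g01 : pvG 0 1 = 1 := by rw [pvG, g00]; norm_num
          have g10 : pvG 1 0 = 1 := by rw [pvG, g00]; norm_num
          have hg : pvG 1 1 = 3 := by
            rw [pvG, if_pos ⟨rfl, rfl⟩, g01, g10, g00]
            norm_num
          have hh : pvH 1 1 = 6 := by
            show ∑ k ∈ Finset.range 3, pvT 1 1 k = 6
            rw [Finset.sum_range_succ, Finset.sum_range_succ, Finset.sum_range_succ,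
                Finset.sum_range_zero]
            simp [pvT]
          rw [hg, hh]
          norm_num
        · rw [pvG, if_neg h00]
          have h1 := ih (i + (j+1)) (by omega) i (j+1) rfl (by simp)
          have h2 := ih ((i+1) + j) (by omega) (i+1) j rfl (by simp)
          have h3 := ih (i + j) (by omega) i j rfl h00
          have hr := pvH_rec i j (by omega)
          linarith

theorem pvG_eq_pvS (A B : ℕ) (hA : 1 ≤ A) (hAB : A ≤ B) : pvG B A = pvS A B := by
  have h2 : 2 * pvG B A = pvH B A := pvG_eq_H (B + A) B A rfl (by omega)
  have h3 : pvH B A = 2 * pvS A B := by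
    have hext : pvH B A = ∑ k ∈ Finset.range (A+1), pvT B A k := by
      unfold pvH
      refine (Finset.sum_subset ?_ ?_).symm
      · intro x hx
        simp only [Finset.mem_range] at *
        omega
      · intro x _ hx
        simp only [Finset.mem_range, not_lt] at hx
        simp only [pvT]
        rw [Nat.choose_eq_zero_of_lt (show A < x by omega)]
        simp
    rw [hext]
    unfold pvS pvSpart
    rw [Finset.mul_sum]
    refine Finset.sum_congr rfl ?_
    intro k hk
    simp only [Finset.mem_range] at hk
    simp only [pvT]
    have he : B + A - k = (A + B - 1 - k) + 1 := by omega
    rw [he, pow_succ]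
    ring
  linarith

-- ---- B's loop ----
def pvBStep (A B : ℕ) (st : ℤ × ℤ × ℤ × ℤ) (k : ℕ) : ℤ × ℤ × ℤ × ℤ :=
  (PySem.Int.mod (st.1 + PySem.Int.mod (PySem.Int.mod st.2.1 pvMOD * PySem.Int.mod st.2.2.1 pvMOD) pvMOD * st.2.2.2) pvMOD,
   PySem.Int.floordiv (st.2.1 * ((A:ℤ) - (k:ℤ))) ((k:ℤ) + 1),
   PySem.Int.floordiv (st.2.2.1 * ((B:ℤ) - (k:ℤ))) ((k:ℤ) + 1),
   PySem.Int.mod (st.2.2.2 * PySem.Int.floordiv (pvMOD + 1) 2) pvMOD)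

lemma pv_s_step (s t u p : ℤ) :
    (s % pvMOD + (t % pvMOD * (u % pvMOD) % pvMOD) * (p % pvMOD)) % pvMOD = (s + t * u * p) % pvMOD := by
  have h : s % pvMOD + (t % pvMOD * (u % pvMOD) % pvMOD) * (p % pvMOD) ≡ s + t * u * p [ZMOD pvMOD] := by
    refine (pv_hm s).add ?_
    refine Int.ModEq.mul ?_ (pv_hm p)
    exact (pv_hm _).trans ((pv_hm t).mul (pv_hm u))
  exact h

lemma pv_pw_step (e : ℕ) :
    ((2:ℤ)^(e+1) % pvMOD * PySem.Int.floordiv (pvMOD + 1) 2) % pvMOD = 2^e % pvMOD := by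
  rw [pv_inv2]
  have heq : ((2:ℤ)^(e+1)) * 500000004 = 2^e * (2 * 500000004) := by
    rw [pow_succ]; ring
  calc ((2:ℤ)^(e+1) % pvMOD) * 500000004
        ≡ 2^(e+1) * 500000004 [ZMOD pvMOD] := (pv_hm _).mul_right _
    _ = 2^e * (2 * 500000004) := heq
    _ ≡ 2^e * 1 [ZMOD pvMOD] := Int.ModEq.mul_left _ (show ((2:ℤ) * 500000004) % pvMOD = 1 % pvMOD by decide)
    _ = 2^e := mul_one _

lemma pv_choose_step (A n : ℕ) (h : n < A) :
    PySem.Int.floordiv ((A.choose n : ℤ) * ((A:ℤ) - (n:ℤ))) ((n:ℤ) + 1) = (A.choose (n+1) : ℤ) := by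
  have h1 : (A:ℤ) - (n:ℤ) = ((A - n : ℕ) : ℤ) := by
    rw [Nat.cast_sub h.le]
  have h2 : ((n:ℤ) + 1) = ((n + 1 : ℕ) : ℤ) := by push_cast; ring
  rw [h1, h2, ← Nat.cast_mul, PySem.Int.floordiv_natCast]
  norm_cast
  rw [← Nat.choose_succ_right_eq]
  exact Nat.mul_div_cancel _ (Nat.succ_pos n)

lemma pv_loop_inv (A B : ℕ) (hA : 1 ≤ A) (hAB : A ≤ B) :
    ∀ n, n ≤ A →
      (List.range n).foldl (pvBStep A B)
        ((0:ℤ), (1:ℤ), (1:ℤ), PySem.Int.powMod 2 ((A:ℤ) + (B:ℤ) - 1).toNat pvMOD)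
      = (pvSpart A B n % pvMOD, (A.choose n : ℤ), (B.choose n : ℤ), 2^(A+B-1-n) % pvMOD) := by
  intro n
  induction n with
  | zero =>
    intro _
    simp only [List.range_zero, List.foldl_nil]
    have ht : ((A:ℤ) + (B:ℤ) - 1).toNat = A + B - 1 := by omega
    rw [PySem.Int.powMod_eq, pv_mod_eq, ht]
    simp [pvSpart]
  | succ n ih =>
    intro hn
    rw [show List.range (n+1) = List.range n ++ [n] from List.range_succ,
        List.foldl_append, List.foldl_cons, List.foldl_nil, ih (by omega)]
    simp only [pvBStep]
    have hca := pv_choose_step A n (by omega)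
    have hcb := pv_choose_step B n (by omega)
    have he : A + B - 1 - n = (A + B - 1 - (n+1)) + 1 := by omega
    refine Prod.ext ?_ (Prod.ext ?_ (Prod.ext ?_ ?_))
    · show PySem.Int.mod (pvSpart A B n % pvMOD +
        PySem.Int.mod (PySem.Int.mod ((A.choose n : ℤ)) pvMOD * PySem.Int.mod ((B.choose n : ℤ)) pvMOD) pvMOD
          * (2^(A+B-1-n) % pvMOD)) pvMOD = pvSpart A B (n+1) % pvMOD
      rw [pv_mod_eq, pv_mod_eq, pv_mod_eq, pv_mod_eq, pv_s_step]
      congr 1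
      unfold pvSpart
      rw [Finset.sum_range_succ]
    · exact hca
    · exact hcb
    · show PySem.Int.mod (2^(A+B-1-n) % pvMOD * PySem.Int.floordiv (pvMOD + 1) 2) pvMOD = 2^(A+B-1-(n+1)) % pvMOD
      rw [pv_mod_eq, he, pv_pw_step]

theorem pv_loopEval (A B : ℕ) (hA : 1 ≤ A) (hAB : A ≤ B) :
    ((PySem.List.pyRange 0 ((A:ℤ) + 1) 1).foldl
      (fun (st : ℤ × ℤ × ℤ × ℤ) (k : ℤ) =>
        (PySem.Int.mod (st.1 + PySem.Int.mod (PySem.Int.mod st.2.1 pvMOD * PySem.Int.mod st.2.2.1 pvMOD) pvMOD * st.2.2.2) pvMOD,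
         PySem.Int.floordiv (st.2.1 * ((A:ℤ) - k)) (k + 1),
         PySem.Int.floordiv (st.2.2.1 * ((B:ℤ) - k)) (k + 1),
         PySem.Int.mod (st.2.2.2 * PySem.Int.floordiv (pvMOD + 1) 2) pvMOD))
      ((0 : ℤ), (1 : ℤ), (1 : ℤ), PySem.Int.powMod 2 ((A:ℤ) + (B:ℤ) - 1).toNat pvMOD)).1
    = pvS A B % pvMOD := by
  rw [pv_range_cast A, List.foldl_map]
  show ((List.range (A+1)).foldl (pvBStep A B)
      ((0 : ℤ), (1 : ℤ), (1 : ℤ), PySem.Int.powMod 2 ((A:ℤ) + (B:ℤ) - 1).toNat pvMOD)).1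
    = pvS A B % pvMOD
  rw [show List.range (A+1) = List.range A ++ [A] from List.range_succ,
      List.foldl_append, List.foldl_cons, List.foldl_nil, pv_loop_inv A B hA hAB A le_rfl]
  show PySem.Int.mod (pvSpart A B A % pvMOD +
      PySem.Int.mod (PySem.Int.mod ((A.choose A : ℤ)) pvMOD * PySem.Int.mod ((B.choose A : ℤ)) pvMOD) pvMOD
        * (2^(A+B-1-A) % pvMOD)) pvMOD = pvS A B % pvMOD
  rw [pv_mod_eq, pv_mod_eq, pv_mod_eq, pv_mod_eq, pv_s_step]
  congr 1
  unfold pvS pvSpart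
  rw [Finset.sum_range_succ]

theorem pv_core (p q : ℕ) (hqp : q ≤ p) : solve ↑p ↑q = solve_alt ↑q ↑p := by
  have hA : ¬((p:ℤ) < (q:ℤ)) := by omega
  have hp1 : ((p:ℤ) + 1).toNat = p + 1 := by omega
  have hq1n : ((q:ℤ) + 1).toNat = q + 1 := by omega
  unfold solve solve_alt
  simp only [if_neg hA, hp1, hq1n]
  by_cases hq : q = 0
  · subst hq
    simp
  · have hq0 : ¬((q:ℤ) = 0) := by omega
    rw [if_neg hq0, if_neg hq0]
    rw [pv_tableEval p q, pv_loopEval q p (by omega) hqp, pvG_eq_pvS q p (by omega) hqp]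

lemma pv_solve_comm (x y : ℤ) : solve x y = solve y x := by
  unfold solve
  rcases lt_trichotomy x y with h | h | h
  · rw [if_pos h, if_neg (by omega : ¬ y < x)]
  · subst h; rfl
  · rw [if_neg (by omega : ¬ x < y), if_pos h]

lemma pv_solvealt_comm (x y : ℤ) : solve_alt x y = solve_alt y x := by
  unfold solve_alt
  rcases lt_trichotomy x y with h | h | h
  · rw [if_neg (by omega : ¬ x > y), if_pos (by omega : y > x)]
  · subst h; rfl
  · rw [if_pos (by omega : x > y), if_neg (by omega : ¬ y > x)]

-- ===== VERDICT (by name: the statement is the Claim_ definition above) =====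
theorem solve_spec : Claim_equal_solve := by
  intro a b _ hpre
  obtain ⟨ha, hb⟩ := hpre
  obtain ⟨p, rfl⟩ : ∃ p : ℕ, a = ↑p := ⟨a.toNat, (Int.toNat_of_nonneg ha).symm⟩
  obtain ⟨q, rfl⟩ : ∃ q : ℕ, b = ↑q := ⟨b.toNat, (Int.toNat_of_nonneg hb).symm⟩
  unfold Spec_solve
  rcases le_total q p with h | h
  · rw [pv_core p q h, pv_solvealt_comm]
  · rw [pv_solve_comm, pv_core q p h, pv_solvealt_comm]
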